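-- pv_equiv track=rewrite | github.com/rollysys/auditit | server.py | _host_of
-- ===== SOURCE A (Python) =====
-- def _host_of(url: str) -> str:
--     if not url:
--         return ""
--     u = url.strip()
--     # Strip scheme
--     if "://" in u:
--         u = u.split("://", 1)[1]
--     # Keep only netloc (drop path/query)
--     for sep in ("/", "?", "#"):
--         if sep in u:
--             u = u.split(sep, 1)[0]
--     # Drop port
--     if ":" in u:
--         u = u.split(":", 1)[0]
--     return u.lower()
-- ===== SOURCE B (Python) =====
-- def _host_of(url: str) -> str:
--     if not url:
--         return ""
--     u = url.strip()
--     i = u.find("://")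
--     if i >= 0:
--         u = u[i + 3:]
--     host = []
--     for ch in u:
--         if ch in "/?#:":
--             break
--         host.append(ch)
--     return "".join(host).lower()
-- ===== Notes on version B (the rewrite author's own statement) =====
-- stated objective: idiomatic
-- what changed: Replaces the scheme-strip split and four successive split-and-keep-prefix passes with a single find for '://' plus one left-to-right scan that stops at the first of '/', '?', '#', ':'.
import Mathlib
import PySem

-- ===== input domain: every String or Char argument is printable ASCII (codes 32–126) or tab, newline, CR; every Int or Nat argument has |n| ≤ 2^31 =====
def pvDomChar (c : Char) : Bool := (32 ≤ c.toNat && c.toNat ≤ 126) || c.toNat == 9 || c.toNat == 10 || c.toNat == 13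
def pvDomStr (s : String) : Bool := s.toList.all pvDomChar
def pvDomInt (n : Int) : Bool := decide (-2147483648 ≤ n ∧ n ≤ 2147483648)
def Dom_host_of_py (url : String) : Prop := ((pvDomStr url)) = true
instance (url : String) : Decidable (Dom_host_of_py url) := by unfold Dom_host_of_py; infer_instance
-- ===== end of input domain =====

-- B replaces the four successive split passes with one find for "://" and a single scan
-- stopping at the first of '/', '?', '#', ':' (idiomatic one-pass host extraction).

-- ===== PORT A =====
-- one single-character split-and-keep-prefix step of A's loop body (and its final ':' step);
-- list indexing [0]/[1] is rendered with getD, exact here because under the isIn guard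
-- split(sep, 1) returns at least two parts (and always at least one).
def aStep (u : List Char) (sep : List Char) : List Char :=
  if PySem.Chars.isIn sep u then (PySem.Chars.splitOnMax u sep 1).getD 0 [] else u

def host_of_py (url : String) : String :=
  if url = "" then "" else
  let u0 := PySem.Chars.strip url.toList
  let u1 := if PySem.Chars.isIn [':', '/', '/'] u0 then
              (PySem.Chars.splitOnMax u0 [':', '/', '/'] 1).getD 1 [] else u0
  let u2 := [['/'], ['?'], ['#']].foldl aStep u1
  let u3 := aStep u2 [':']
  String.ofList (PySem.Chars.lower u3)

-- ===== PORT B =====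
-- the for-loop of Source B: collect characters until one of "/?#:" is met (break)
def bHost : List Char → List Char
  | [] => []
  | c :: rest => if c ∈ ['/', '?', '#', ':'] then [] else c :: bHost rest

def host_of_py_alt (url : String) : String :=
  if url = "" then "" else
  let u0 := PySem.Chars.strip url.toList
  let i := PySem.Chars.find u0 [':', '/', '/']
  let u1 := if 0 ≤ i then PySem.Chars.slice u0 (some (i + 3)) none else u0
  String.ofList (PySem.Chars.lower (bHost u1))

-- ===== PRECONDITION & SPEC =====
def Spec_host_of_py (url : String) (out : String) : Prop := out = host_of_py_alt url
instance (url : String) (out : String) : Decidable (Spec_host_of_py url out) := by unfold Spec_host_of_py; infer_instance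

-- ===== CLAIM (what is proved, stated in full; the proofs are below) =====
def Claim_equal_host_of_py : Prop := ∀ (url : String), Dom_host_of_py url → Spec_host_of_py url (host_of_py url)

-- ===== LEMMAS AND PROOFS =====

def firstIdx (sep : List Char) : List Char → Option Nat
  | [] => none
  | c :: rest => if sep.isPrefixOf (c :: rest) then some 0 else (firstIdx sep rest).map (· + 1)

theorem findgo_eq (sep : List Char) (hsep : sep ≠ []) :
    ∀ (l : List Char) (k : Nat), PySem.Chars.find.go sep l k =
      match firstIdx sep l with
      | some i => ((k + i : Nat) : Int)
      | none => -1 := by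
  intro l
  induction l with
  | nil => intro k; simp [PySem.Chars.find.go, firstIdx, List.isEmpty_iff, hsep]
  | cons c rest ih =>
    intro k
    rw [PySem.Chars.find.go]
    by_cases hp : sep.isPrefixOf (c :: rest)
    · simp [hp, firstIdx]
    · simp only [hp, if_false, firstIdx, ih (k+1), Bool.false_eq_true]
      cases hfi : firstIdx sep rest with
      | none => simp
      | some i => simp; ring

theorem go_zero (sep : List Char) (fuel : Nat) (l cur : List Char) (acc : List (List Char))
    (hf : 0 < fuel) :
    PySem.Chars.splitOnMax.go sep fuel 0 l cur acc = ((cur.reverse ++ l) :: acc).reverse := by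
  obtain ⟨f, rfl⟩ : ∃ f, fuel = f + 1 := ⟨fuel - 1, by omega⟩
  cases l with
  | nil => rw [PySem.Chars.splitOnMax.go]; simp; omega
  | cons c rest => rw [PySem.Chars.splitOnMax.go]; simp

theorem go_eq (sep : List Char) (hsep : sep ≠ []) :
    ∀ (l : List Char) (cur : List Char) (fuel : Nat), l.length < fuel →
      PySem.Chars.splitOnMax.go sep fuel 1 l cur [] =
        match firstIdx sep l with
        | none => [cur.reverse ++ l]
        | some i => [cur.reverse ++ l.take i, l.drop (i + sep.length)] := by
  intro l
  induction l with
  | nil =>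
    intro cur fuel hf
    obtain ⟨f, rfl⟩ : ∃ f, fuel = f + 1 := ⟨fuel - 1, by omega⟩
    rw [PySem.Chars.splitOnMax.go]
    simp [firstIdx]
    omega
  | cons c rest ih =>
    intro cur fuel hf
    obtain ⟨f, rfl⟩ : ∃ f, fuel = f + 1 := ⟨fuel - 1, by omega⟩
    rw [PySem.Chars.splitOnMax.go]
    by_cases hp : sep.isPrefixOf (c :: rest)
    · have hlen : 1 ≤ sep.length := List.length_pos_of_ne_nil hsep
      have : PySem.Chars.splitOnMax.go sep f 0 (List.drop sep.length (c :: rest)) [] [cur.reverse]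
          = (([] ++ List.drop sep.length (c :: rest)) :: [cur.reverse]).reverse := by
        apply go_zero
        simp at hf ⊢
        omega
      simp only [hp, if_true, Nat.succ_ne_zero, if_false, this, firstIdx]
      simp
    · simp only [hp, Bool.false_eq_true, if_false, if_neg (by omega : ¬ (1 = 0))]
      rw [ih (c :: cur) f (by simp at hf ⊢; omega)]
      simp only [firstIdx, hp, Bool.false_eq_true, if_false]
      cases hfi : firstIdx sep rest with
      | none => simp
      | some i => simp [List.drop_succ_cons, List.take_succ_cons, Nat.add_right_comm]

theorem splitOnMax_eq (sep : List Char) (hsep : sep ≠ []) (l : List Char) :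
    PySem.Chars.splitOnMax l sep 1 =
      match firstIdx sep l with
      | none => [l]
      | some i => [l.take i, l.drop (i + sep.length)] := by
  rw [PySem.Chars.splitOnMax]
  norm_num
  rw [go_eq sep hsep l [] (l.length + 1) (by omega)]
  cases hfi : firstIdx sep l <;> simp

theorem find_eq_firstIdx (sep : List Char) (hsep : sep ≠ []) (l : List Char) :
    PySem.Chars.find l sep =
      match firstIdx sep l with
      | some i => (i : Int)
      | none => -1 := by
  rw [PySem.Chars.find, findgo_eq sep hsep l 0]
  cases hfi : firstIdx sep l <;> simp

theorem firstIdx_none_char (c : Char) (l : List Char) (h : firstIdx [c] l = none) :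
    l.takeWhile (· ≠ c) = l := by
  induction l with
  | nil => rfl
  | cons a rest ih =>
    rw [firstIdx] at h
    by_cases hp : [c].isPrefixOf (a :: rest)
    · simp [hp] at h
    · simp only [hp, Bool.false_eq_true, if_false, Option.map_eq_none_iff] at h
      have hac : a ≠ c := by
        intro rfl'; exact hp (by simp [List.isPrefixOf, rfl'])
      have h2 : List.takeWhile (· ≠ c) (a :: rest) = a :: List.takeWhile (· ≠ c) rest := by
        simp [hac]
      rw [h2, ih h]

theorem firstIdx_char_take (c : Char) (l : List Char) :
    ∀ i, firstIdx [c] l = some i → l.take i = l.takeWhile (· ≠ c) := by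
  induction l with
  | nil => intro i h; simp [firstIdx] at h
  | cons a rest ih =>
    intro i h
    rw [firstIdx] at h
    by_cases hp : [c].isPrefixOf (a :: rest)
    · have hac : a = c := by
        have h1 : c = a := by simpa [List.isPrefixOf] using hp
        exact h1.symm
      simp [hp] at h
      simp [← h, List.takeWhile, hac]
    · have hac : a ≠ c := by
        intro rfl'; exact hp (by simp [List.isPrefixOf, rfl'])
      simp only [hp, Bool.false_eq_true, if_false, Option.map_eq_some_iff] at h
      obtain ⟨j, hj, rfl⟩ := h
      simp [List.takeWhile, hac, ih j hj]

theorem step_char (c : Char) (l : List Char) : aStep l [c] = l.takeWhile (· ≠ c) := by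
  rw [aStep, PySem.Chars.isIn, find_eq_firstIdx [c] (by simp) l,
    splitOnMax_eq [c] (by simp) l]
  cases hfi : firstIdx [c] l with
  | none => simpa using (firstIdx_none_char c l hfi).symm
  | some i => simpa using (firstIdx_char_take c l i hfi)

theorem step_scheme (l : List Char) :
    (if PySem.Chars.isIn [':', '/', '/'] l then
        (PySem.Chars.splitOnMax l [':', '/', '/'] 1).getD 1 [] else l) =
      (if 0 ≤ PySem.Chars.find l [':', '/', '/'] then
        PySem.Chars.slice l (some (PySem.Chars.find l [':', '/', '/'] + 3)) none else l) := by
  rw [PySem.Chars.isIn, find_eq_firstIdx [':', '/', '/'] (by simp) l,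
    splitOnMax_eq [':', '/', '/'] (by simp) l]
  cases hfi : firstIdx [':', '/', '/'] l with
  | none => norm_num
  | some i =>
    have h3 : ((i : Int) + 3) = ((i + 3 : Nat) : Int) := by push_cast; ring
    simp only [PySem.Chars.slice_eq_listSlice]
    rw [h3, PySem.List.slice_from l (by positivity)]
    have hne : ¬((i : Int) = -1) := by omega
    simp [hne]
    omega

theorem bHost_eq (l : List Char) :
    bHost l = (((l.takeWhile (· ≠ '/')).takeWhile (· ≠ '?')).takeWhile (· ≠ '#')).takeWhile (· ≠ ':') := by
  induction l with
  | nil => rfl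
  | cons c rest ih =>
    rw [bHost]
    by_cases h1 : c = '/'
    · simp [h1]
    by_cases h2 : c = '?'
    · simp [h2]
    by_cases h3 : c = '#'
    · simp [h3]
    by_cases h4 : c = ':'
    · simp [h4]
    · simp [h1, h2, h3, h4, List.takeWhile_cons, ih]

-- ===== VERDICT (by name: the statement is the Claim_ definition above) =====
theorem host_of_py_spec : Claim_equal_host_of_py := by
  intro url _
  unfold Spec_host_of_py host_of_py host_of_py_alt
  by_cases h : url = ""
  · simp [h]
  · simp only [h, if_false]
    rw [step_scheme]
    simp only [List.foldl]
    rw [step_char, step_char, step_char, step_char, bHost_eq]
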